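-- pv_equiv track=rewrite | github.com/mit-acl/deep_panther | panther/other/sim/plot_data.py | sort_for_plot_box_1_traj_6_traj
-- ===== SOURCE A (Python) =====
-- def sort_for_plot_box_1_traj_6_traj(data):
--
--     list = []
--
--     for folder in data:
--         if "/1_traj/parm/" in folder:
--             list.append(folder)
--
--     for folder in data:
--         if "/6_traj/parm/" in folder:
--             list.append(folder)
--
--     for folder in data:
--         if "/1_traj/parm_star/" in folder:
--             list.append(folder)
--
--     for folder in data:
--         if "/6_traj/parm_star/" in folder:
--             list.append(folder)
--
--     for folder in data:
--         if "/6_traj/primer/" in folder: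
--             list.append(folder)
--
--     return list
-- ===== SOURCE B (Python) =====
-- def sort_for_plot_box_1_traj_6_traj(data):
--     patterns = ["/1_traj/parm/", "/6_traj/parm/", "/1_traj/parm_star/",
--                 "/6_traj/parm_star/", "/6_traj/primer/"]
--     buckets = [[] for _ in patterns]
--     for folder in data:
--         for i, p in enumerate(patterns):
--             if p in folder:
--                 buckets[i].append(folder)
--     out = []
--     for b in buckets:
--         out += b
--     return out
-- ===== Notes on version B (the rewrite author's own statement) =====
-- stated objective: alternative
-- what changed: replaces five separate scans of data (one per pattern) by a single pass that distributes each folder into per-pattern buckets, concatenated at the end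
import Mathlib
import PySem

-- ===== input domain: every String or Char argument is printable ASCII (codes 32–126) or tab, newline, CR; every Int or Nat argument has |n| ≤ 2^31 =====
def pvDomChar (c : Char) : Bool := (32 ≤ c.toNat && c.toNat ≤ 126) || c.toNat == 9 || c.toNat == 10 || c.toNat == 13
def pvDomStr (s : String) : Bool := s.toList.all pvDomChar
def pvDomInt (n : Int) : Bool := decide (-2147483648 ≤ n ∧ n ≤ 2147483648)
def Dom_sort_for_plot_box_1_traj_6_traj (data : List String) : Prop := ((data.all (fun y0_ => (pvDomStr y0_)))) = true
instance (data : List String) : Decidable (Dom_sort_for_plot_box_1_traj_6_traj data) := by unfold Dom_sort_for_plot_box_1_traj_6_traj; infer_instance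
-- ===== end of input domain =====

-- ===== PORT A =====
-- B replaces A's five separate scans of data by one bucketing pass; same return value (objective: alternative decomposition).
def sort_for_plot_box_1_traj_6_traj (data : List String) : List String :=
  let l1 := data.foldl (fun acc folder => if PySem.Str.isIn "/1_traj/parm/" folder then acc ++ [folder] else acc) []
  let l2 := data.foldl (fun acc folder => if PySem.Str.isIn "/6_traj/parm/" folder then acc ++ [folder] else acc) l1
  let l3 := data.foldl (fun acc folder => if PySem.Str.isIn "/1_traj/parm_star/" folder then acc ++ [folder] else acc) l2
  let l4 := data.foldl (fun acc folder => if PySem.Str.isIn "/6_traj/parm_star/" folder then acc ++ [folder] else acc) l3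
  data.foldl (fun acc folder => if PySem.Str.isIn "/6_traj/primer/" folder then acc ++ [folder] else acc) l4

-- ===== PORT B =====
def pvPatterns : List String :=
  ["/1_traj/parm/", "/6_traj/parm/", "/1_traj/parm_star/", "/6_traj/parm_star/", "/6_traj/primer/"]

-- one pass: each folder is appended to the bucket of every pattern it contains
def pvBucketStep (buckets : List (List String)) (folder : String) : List (List String) :=
  buckets.zipWith (fun b p => if PySem.Str.isIn p folder then b ++ [folder] else b) pvPatterns

def sort_for_plot_box_1_traj_6_traj_alt (data : List String) : List String :=
  let buckets := data.foldl pvBucketStep (pvPatterns.map (fun _ => []))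
  buckets.foldl (fun out b => out ++ b) []

-- ===== PRECONDITION & SPEC =====
def Spec_sort_for_plot_box_1_traj_6_traj (data : List String) (out : List String) : Prop := out = sort_for_plot_box_1_traj_6_traj_alt data
instance (data : List String) (out : List String) : Decidable (Spec_sort_for_plot_box_1_traj_6_traj data out) := by unfold Spec_sort_for_plot_box_1_traj_6_traj; infer_instance

-- ===== CLAIM (what is proved, stated in full; the proofs are below) =====
def Claim_equal_sort_for_plot_box_1_traj_6_traj : Prop := ∀ (data : List String), Dom_sort_for_plot_box_1_traj_6_traj data → Spec_sort_for_plot_box_1_traj_6_traj data (sort_for_plot_box_1_traj_6_traj data)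

-- ===== LEMMAS AND PROOFS =====
-- the bucket fold, started from five buckets, yields each bucket extended by its filter
theorem pvBucket_inv (data : List String) (b1 b2 b3 b4 b5 : List String) :
    data.foldl pvBucketStep [b1, b2, b3, b4, b5] =
      [b1 ++ data.filter (fun f => PySem.Str.isIn "/1_traj/parm/" f),
       b2 ++ data.filter (fun f => PySem.Str.isIn "/6_traj/parm/" f),
       b3 ++ data.filter (fun f => PySem.Str.isIn "/1_traj/parm_star/" f),
       b4 ++ data.filter (fun f => PySem.Str.isIn "/6_traj/parm_star/" f),
       b5 ++ data.filter (fun f => PySem.Str.isIn "/6_traj/primer/" f)] := by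
  induction data generalizing b1 b2 b3 b4 b5 with
  | nil => simp
  | cons f t ih =>
    simp only [List.foldl_cons, pvBucketStep, pvPatterns, List.zipWith, List.filter_cons]
    rw [ih]
    split_ifs <;> simp_all

-- ===== VERDICT (by name: the statement is the Claim_ definition above) =====
theorem sort_for_plot_box_1_traj_6_traj_spec : Claim_equal_sort_for_plot_box_1_traj_6_traj := by
  intro data _
  unfold Spec_sort_for_plot_box_1_traj_6_traj sort_for_plot_box_1_traj_6_traj sort_for_plot_box_1_traj_6_traj_alt
  show _ = ((data.foldl pvBucketStep [[], [], [], [], []]).foldl (fun out b => out ++ b) [])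
  rw [pvBucket_inv]
  rw [PySem.List.foldl_append_if_eq_filter, PySem.List.foldl_append_if_eq_filter,
      PySem.List.foldl_append_if_eq_filter, PySem.List.foldl_append_if_eq_filter,
      PySem.List.foldl_append_if_eq_filter]
  simp only [List.nil_append, List.foldl_cons, List.foldl_nil, List.append_assoc]
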